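-- pv_equiv track=rewrite | github.com/leviathan-news/tg-bot-detector | tg_purge/labeling.py | label_stats
-- ===== SOURCE A (Python) =====
-- def label_stats(labels: dict) -> dict:
--     """Compute aggregate statistics over a label mapping.
--
--     Args:
--         labels: Mapping of user_id → {"label": str, "source": str, ...}.
--                 Typically the "labels" sub-dict returned by load_labels().
--
--     Returns:
--         dict with the following integer counts:
--           "bot"          — entries with label == "bot"
--           "human"        — entries with label == "human"
--           "unlabeled"    — entries with label == "unlabeled"
--           "total"        — total number of entries (bot + human + unlabeled)
--           "human_labeled"— entries where source == "human" (analyst-reviewed)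
--     """
--     bot_count = 0
--     human_count = 0
--     unlabeled_count = 0
--     human_labeled_count = 0
--
--     for _uid, info in labels.items():
--         label = info.get("label", "unlabeled")
--         source = info.get("source", "")
--
--         if label == "bot":
--             bot_count += 1
--         elif label == "human":
--             human_count += 1
--         else:
--             # Treat any unknown label as unlabeled to be safe.
--             unlabeled_count += 1
--
--         if source == "human":
--             human_labeled_count += 1
--
--     return {
--         "bot": bot_count,
--         "human": human_count,
--         "unlabeled": unlabeled_count,
--         "total": bot_count + human_count + unlabeled_count,
--         "human_labeled": human_labeled_count,
--     }
-- ===== SOURCE B (Python) =====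
-- def label_stats(labels: dict) -> dict:
--     """Aggregate label statistics via a frequency table instead of branch counters."""
--     norm = [info.get("label", "unlabeled") for info in labels.values()]
--     c = {}
--     for lbl in norm:
--         c[lbl] = c.get(lbl, 0) + 1
--     bot = c.get("bot", 0)
--     human = c.get("human", 0)
--     total = len(labels)
--     sources = [info.get("source", "") for info in labels.values()]
--     return {
--         "bot": bot,
--         "human": human,
--         "unlabeled": total - bot - human,
--         "total": total,
--         "human_labeled": sources.count("human"),
--     }
-- ===== Notes on version B (the rewrite author's own statement) =====
-- stated objective: idiomatic
-- what changed: Replaced A's single branching loop with four running counters by a frequency table of normalized labels plus derived arithmetic: bot/human read from the table, total = len(labels), unlabeled = total - bot - human, and human_labeled counted with list.count over the extracted sources.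
import Mathlib
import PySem

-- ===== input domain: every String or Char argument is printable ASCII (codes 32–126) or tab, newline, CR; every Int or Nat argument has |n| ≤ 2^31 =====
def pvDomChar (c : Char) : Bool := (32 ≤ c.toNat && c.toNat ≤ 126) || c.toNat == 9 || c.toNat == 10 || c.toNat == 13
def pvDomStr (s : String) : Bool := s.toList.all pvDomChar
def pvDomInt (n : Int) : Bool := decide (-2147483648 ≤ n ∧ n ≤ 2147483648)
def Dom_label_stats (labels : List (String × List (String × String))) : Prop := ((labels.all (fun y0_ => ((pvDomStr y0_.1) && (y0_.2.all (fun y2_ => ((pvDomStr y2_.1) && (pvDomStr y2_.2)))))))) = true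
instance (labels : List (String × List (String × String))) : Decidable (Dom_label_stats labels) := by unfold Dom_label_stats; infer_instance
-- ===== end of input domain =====

-- B changes the decomposition: a frequency table of normalized labels plus arithmetic (unlabeled = total − bot − human, total = len) replaces A's single branching loop with four running counters; same results, same cost.

-- shared primitive: Python's info.get(key, default) on an association list (first match)
def pyGetStr (info : List (String × String)) (k dflt : String) : String :=
  match info.find? (fun p => p.1 == k) with
  | some p => p.2
  | none => dflt

-- ===== PORT A =====
def label_stats (labels : List (String × List (String × String))) : List (String × Int) :=
  let s := labels.foldl (fun (st : Int × Int × Int × Int) p =>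
      let label := pyGetStr p.2 "label" "unlabeled"
      let source := pyGetStr p.2 "source" ""
      let st1 := if label = "bot" then (st.1 + 1, st.2.1, st.2.2.1)
                 else if label = "human" then (st.1, st.2.1 + 1, st.2.2.1)
                 else (st.1, st.2.1, st.2.2.1 + 1)
      let hl := if source = "human" then st.2.2.2 + 1 else st.2.2.2
      (st1.1, st1.2.1, st1.2.2, hl)) (0, 0, 0, 0)
  [("bot", s.1), ("human", s.2.1), ("unlabeled", s.2.2.1),
   ("total", s.1 + s.2.1 + s.2.2.1), ("human_labeled", s.2.2.2)]

-- ===== PORT B =====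
def label_stats_alt (labels : List (String × List (String × String))) : List (String × Int) :=
  let norm := labels.map (fun p => pyGetStr p.2 "label" "unlabeled")
  let c := norm.foldl (fun (d : PySem.Dict String Int) x => d.insert x (d.getD x 0 + 1)) PySem.Dict.empty
  let bot := c.getD "bot" 0
  let human := c.getD "human" 0
  let total : Int := labels.length
  let sources := labels.map (fun p => pyGetStr p.2 "source" "")
  [("bot", bot), ("human", human), ("unlabeled", total - bot - human),
   ("total", total), ("human_labeled", (sources.count "human" : Int))]

-- ===== PRECONDITION & SPEC =====
def Spec_label_stats (labels : List (String × List (String × String))) (out : List (String × Int)) : Prop := out = label_stats_alt labels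
instance (labels : List (String × List (String × String))) (out : List (String × Int)) : Decidable (Spec_label_stats labels out) := by unfold Spec_label_stats; infer_instance

-- ===== CLAIM (what is proved, stated in full; the proofs are below) =====
def Claim_equal_label_stats : Prop := ∀ (labels : List (String × List (String × String))), Dom_label_stats labels → Spec_label_stats labels (label_stats labels)

-- ===== LEMMAS AND PROOFS =====

-- A's loop from an arbitrary accumulator, characterised by counts over the normalized label / source lists
lemma label_stats_loop (labels : List (String × List (String × String))) (b h u hl : Int) :
    labels.foldl (fun (st : Int × Int × Int × Int) p =>
      let label := pyGetStr p.2 "label" "unlabeled"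
      let source := pyGetStr p.2 "source" ""
      let st1 := if label = "bot" then (st.1 + 1, st.2.1, st.2.2.1)
                 else if label = "human" then (st.1, st.2.1 + 1, st.2.2.1)
                 else (st.1, st.2.1, st.2.2.1 + 1)
      let hl := if source = "human" then st.2.2.2 + 1 else st.2.2.2
      (st1.1, st1.2.1, st1.2.2, hl)) (b, h, u, hl)
    = (b + ((labels.map (fun p => pyGetStr p.2 "label" "unlabeled")).count "bot" : Int),
       h + ((labels.map (fun p => pyGetStr p.2 "label" "unlabeled")).count "human" : Int),
       u + ((labels.length : Int)
            - ((labels.map (fun p => pyGetStr p.2 "label" "unlabeled")).count "bot" : Int)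
            - ((labels.map (fun p => pyGetStr p.2 "label" "unlabeled")).count "human" : Int)),
       hl + ((labels.map (fun p => pyGetStr p.2 "source" "")).count "human" : Int)) := by
  induction labels generalizing b h u hl with
  | nil => simp
  | cons p rest ih =>
      simp only [List.foldl_cons, List.map_cons, List.length_cons]
      rw [ih]
      by_cases hb : pyGetStr p.2 "label" "unlabeled" = "bot" <;>
        by_cases hh : pyGetStr p.2 "label" "unlabeled" = "human" <;>
        by_cases hs : pyGetStr p.2 "source" "" = "human" <;>
        simp [hb, hh, hs] <;> omega

-- ===== VERDICT (by name: the statement is the Claim_ definition above) =====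
theorem label_stats_spec : Claim_equal_label_stats := by
  intro labels _
  show label_stats labels = label_stats_alt labels
  simp only [label_stats, label_stats_alt, label_stats_loop,
             PySem.Dict.getD_foldl_insert_add_one, PySem.Dict.getD_empty]
  norm_num
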